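-- pv_equiv track=rewrite | github.com/Excel1974/Excel | module_0/The_fastest_start.py | game_core_v3
-- ===== SOURCE A (Python) =====
-- def game_core_v3(number):
--
--     # Функция принимает загаданное число и возвращает число попыток (в среднем за 25 попыток)
--     # Сначала устанавливаем не любое random число, а среднее число т.е. 50
--     # потом уменьшаем или увеличиваем его с шагом 1 в зависимости от того, больше оно или меньше нужного.
--
--
--     count = 1        # счетчик попыток
--     predict = 50     # угадываемое число, инициализация = 50
--
--     while number != predict:     # перебираем последовательно "вверх" или "вниз" с шагом 1
--         count+=1
--
--         if number > predict:
--             predict += 1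
--         elif number < predict:
--             predict -= 1
--
--     return(count) # выход из цикла, если угадали
-- ===== SOURCE B (Python) =====
-- def game_core_v3(number):
--     # Closed form: the loop moves predict from 50 toward number one step per
--     # extra attempt, so attempts = |number - 50| + 1.
--     return abs(number - 50) + 1
-- ===== Notes on version B (the rewrite author's own statement) =====
-- stated objective: faster
-- what changed: Replaced the step-by-step while loop from 50 with the closed form abs(number-50)+1.
import Mathlib
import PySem

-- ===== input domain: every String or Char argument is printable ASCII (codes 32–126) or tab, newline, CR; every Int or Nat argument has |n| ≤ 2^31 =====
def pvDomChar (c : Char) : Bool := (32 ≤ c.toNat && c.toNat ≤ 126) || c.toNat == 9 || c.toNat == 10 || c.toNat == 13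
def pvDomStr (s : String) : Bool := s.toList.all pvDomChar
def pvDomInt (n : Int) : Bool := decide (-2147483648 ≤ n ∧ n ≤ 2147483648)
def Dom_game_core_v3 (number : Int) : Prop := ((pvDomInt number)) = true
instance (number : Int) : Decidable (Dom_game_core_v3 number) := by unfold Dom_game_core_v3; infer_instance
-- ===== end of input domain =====

-- ===== PORT A =====
-- loop: while number != predict: count += 1; step predict toward number
def gameLoopA (number predict count : Int) : Int :=
  if h : number = predict then count
  else
    if number > predict then gameLoopA number (predict + 1) (count + 1)
    else gameLoopA number (predict - 1) (count + 1)
termination_by (number - predict).natAbs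
decreasing_by
  · omega
  · omega

def game_core_v3 (number : Int) : Int := gameLoopA number 50 1

-- ===== PORT B =====
def game_core_v3_alt (number : Int) : Int := |number - 50| + 1
-- ===== PRECONDITION & SPEC =====
def Spec_game_core_v3 (number : Int) (out : Int) : Prop := out = game_core_v3_alt number
instance (number : Int) (out : Int) : Decidable (Spec_game_core_v3 number out) := by unfold Spec_game_core_v3; infer_instance

-- ===== CLAIM (what is proved, stated in full; the proofs are below) =====
def Claim_equal_game_core_v3 : Prop := ∀ (number : Int), Dom_game_core_v3 number → Spec_game_core_v3 number (game_core_v3 number)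

-- ===== LEMMAS AND PROOFS =====
theorem gameLoopA_eq (number predict count : Int) :
    gameLoopA number predict count = (number - predict).natAbs + count := by
  fun_induction gameLoopA number predict count with
  | case1 => omega
  | case2 n p c h ih => rw [ih]; omega
  | case3 n p c h ih => rw [ih]; omega

-- ===== VERDICT (by name: the statement is the Claim_ definition above) =====
theorem game_core_v3_spec : Claim_equal_game_core_v3 := by
  intro n _
  unfold Spec_game_core_v3 game_core_v3 game_core_v3_alt
  rw [gameLoopA_eq, abs_sub_comm]
  rw [Int.abs_eq_natAbs]
  omega
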